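-- pv_equiv track=rewrite | github.com/posl/comment_recommendation | script/mod_gen/2_time/en/192_B/1.py | is_hard_to_read
-- ===== SOURCE A (Python) =====
-- def is_hard_to_read(s):
--     for i in range(len(s)):
--         if i % 2 == 0:
--             if s[i].isupper():
--                 return False
--         else:
--             if s[i].islower():
--                 return False
--     return True
-- ===== SOURCE B (Python) =====
-- def is_hard_to_read(s):
--     # Consume the string two characters at a time with an iterator:
--     # no index variable, no parity test.
--     it = iter(s)
--     for a in it:
--         if a.isupper():
--             return False
--         b = next(it, None)
--         if b is not None and b.islower():
--             return False
--     return True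
-- ===== Notes on version B (the rewrite author's own statement) =====
-- stated objective: alternative
-- what changed: Replaces the indexed loop with a modulo-parity branch by an iterator that consumes the string two characters at a time, checking the first of each pair for uppercase and the second for lowercase, with no index and no parity arithmetic.
import Mathlib
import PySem

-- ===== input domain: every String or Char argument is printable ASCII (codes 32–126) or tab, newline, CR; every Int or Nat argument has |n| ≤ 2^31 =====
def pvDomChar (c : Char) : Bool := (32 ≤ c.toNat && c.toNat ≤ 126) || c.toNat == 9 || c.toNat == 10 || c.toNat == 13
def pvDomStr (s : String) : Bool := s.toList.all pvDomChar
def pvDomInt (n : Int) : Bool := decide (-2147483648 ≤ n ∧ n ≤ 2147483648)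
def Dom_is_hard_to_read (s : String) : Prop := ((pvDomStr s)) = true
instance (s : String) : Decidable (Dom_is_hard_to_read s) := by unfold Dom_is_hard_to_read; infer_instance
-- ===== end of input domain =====

-- B replaces A's indexed loop with parity branch by pairwise (two-at-a-time) consumption of the string; alternative decomposition, same cost.


-- ===== PORT A =====
-- A's for-loop over range(len(s)): index i carried along, branch on i % 2.
def goA : List Char → Nat → Bool
  | [], _ => true
  | c :: rest, i =>
    if i % 2 == 0 then
      if PySem.Chars.isupper c then false else goA rest (i + 1)
    else
      if PySem.Chars.islower c then false else goA rest (i + 1)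

def is_hard_to_read (s : String) : Bool := goA s.toList 0

-- ===== PORT B =====
-- B's iterator loop: take the next character a (fail if uppercase), then
-- the character after it, if any (fail if lowercase), and continue.
def goB : List Char → Bool
  | [] => true
  | a :: rest =>
    if PySem.Chars.isupper a then false
    else
      match rest with
      | [] => true
      | b :: rest' => if PySem.Chars.islower b then false else goB rest'

def is_hard_to_read_alt (s : String) : Bool := goB s.toList

-- ===== PRECONDITION & SPEC =====
def Spec_is_hard_to_read (s : String) (out : Bool) : Prop := out = is_hard_to_read_alt s
instance (s : String) (out : Bool) : Decidable (Spec_is_hard_to_read s out) := by unfold Spec_is_hard_to_read; infer_instance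

-- ===== CLAIM (what is proved, stated in full; the proofs are below) =====
def Claim_equal_is_hard_to_read : Prop := ∀ (s : String), Dom_is_hard_to_read s → Spec_is_hard_to_read s (is_hard_to_read s)

-- ===== LEMMAS AND PROOFS =====
theorem goA_eq_goB (cs : List Char) (i : Nat) (h : i % 2 = 0) : goA cs i = goB cs := by
  match cs with
  | [] => simp [goA, goB]
  | [a] =>
    simp [goA, goB, h]
  | a :: b :: rest =>
    have h1 : (i + 1) % 2 = 1 := by omega
    have h2 : (i + 2) % 2 = 0 := by omega
    have ih := goA_eq_goB rest (i + 2) h2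
    simp [goA, goB, h, h1, ih]
termination_by cs.length

-- ===== VERDICT (by name: the statement is the Claim_ definition above) =====
theorem is_hard_to_read_spec : Claim_equal_is_hard_to_read := by
  intro s _
  unfold Spec_is_hard_to_read is_hard_to_read is_hard_to_read_alt
  exact goA_eq_goB s.toList 0 rfl
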